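-- pv_equiv track=rewrite | github.com/igotchalk/SWIsmall | notebook/PassiveActiveSWI_200202_sherlock.py | filt_inds_from_dict
-- ===== SOURCE A (Python) =====
-- def filt_inds_from_dict(dict,inds):
--     i=0
--     dict_false = {}
--     dict_true = {}
--     for k,v in dict.items():
--         vtrue = [x for i, x in enumerate(v) if i in inds]
--         vfalse = [x for i, x in enumerate(v) if i not in inds]
--         dict_true[k] = vtrue
--         dict_false[k] = vfalse
--         i+=1
--     return dict_true,dict_false
-- ===== SOURCE B (Python) =====
-- def filt_inds_from_dict(dict, inds):
--     # sort-and-merge: dedup/sort the wanted indices once, then split each value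
--     # list with a single two-pointer merge against that sorted index list
--     sel = sorted({i for i in inds if i >= 0})
--     dict_true = {}
--     dict_false = {}
--     for k, v in dict.items():
--         vt = []
--         vf = []
--         p = 0
--         for j, x in enumerate(v):
--             if p < len(sel) and sel[p] == j:
--                 vt.append(x)
--                 p += 1
--             else:
--                 vf.append(x)
--         dict_true[k] = vt
--         dict_false[k] = vf
--     return dict_true, dict_false
-- ===== Notes on version B (the rewrite author's own statement) =====
-- stated objective: faster
-- what changed: Instead of A's two 'i in inds' membership-filter comprehensions per value list, B sorts the deduplicated nonnegative wanted indices once up front and splits each value list in a single two-pointer merge against that sorted index list, removing the per-element linear scan of inds.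
import Mathlib
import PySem

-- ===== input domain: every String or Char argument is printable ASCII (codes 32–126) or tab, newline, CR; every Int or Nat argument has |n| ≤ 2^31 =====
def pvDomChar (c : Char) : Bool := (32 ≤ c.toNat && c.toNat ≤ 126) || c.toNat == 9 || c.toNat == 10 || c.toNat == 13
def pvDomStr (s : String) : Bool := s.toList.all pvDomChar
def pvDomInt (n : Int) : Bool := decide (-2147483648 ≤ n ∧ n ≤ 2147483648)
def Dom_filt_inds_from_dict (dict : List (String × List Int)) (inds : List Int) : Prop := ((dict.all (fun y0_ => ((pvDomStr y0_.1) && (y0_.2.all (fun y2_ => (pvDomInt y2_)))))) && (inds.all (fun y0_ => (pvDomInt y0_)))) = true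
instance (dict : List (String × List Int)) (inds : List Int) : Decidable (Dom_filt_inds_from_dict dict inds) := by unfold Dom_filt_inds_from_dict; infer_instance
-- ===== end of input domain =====

-- B replaces A's per-element membership filtering (two 'i in inds' comprehensions
-- per value list) by sorting the deduplicated wanted indices once and splitting
-- each value list with a single two-pointer merge against that sorted index list
-- (objective: alternative algorithm).

-- ===== PORT A =====
-- A keeps a counter i that it increments but never uses; kept for faithfulness.
def filt_inds_from_dict (dict : List (String × List Int)) (inds : List Int) : (List (String × List Int)) × (List (String × List Int)) :=
  let st :=
    dict.foldl
      (fun (st : Int × PySem.Dict String (List Int) × PySem.Dict String (List Int)) kv =>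
        let vtrue := ((PySem.List.enumerate kv.2).filter (fun p => inds.contains p.1)).map (·.2)
        let vfalse := ((PySem.List.enumerate kv.2).filter (fun p => !(inds.contains p.1))).map (·.2)
        (st.1 + 1, st.2.1.insert kv.1 vtrue, st.2.2.insert kv.1 vfalse))
      ((0 : Int), (PySem.Dict.empty : PySem.Dict String (List Int)), (PySem.Dict.empty : PySem.Dict String (List Int)))
  (st.2.1.items, st.2.2.items)

-- ===== PORT B =====
-- the inner two-pointer merge loop of Source B: pointer p into the sorted index list sel
def pvMergeLoop (sel : List Int) (pairs : List (Int × Int)) (p : Int) (vt vf : List Int) : List Int × List Int :=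
  match pairs with
  | [] => (vt, vf)
  | (j, x) :: rest =>
      if (decide (p < (sel.length : Int))) && (((PySem.List.pyGet? sel p).getD 0) == j) then
        pvMergeLoop sel rest (p + 1) (vt ++ [x]) vf
      else
        pvMergeLoop sel rest p vt (vf ++ [x])

def filt_inds_from_dict_alt (dict : List (String × List Int)) (inds : List Int) : (List (String × List Int)) × (List (String × List Int)) :=
  let sel := PySem.List.sorted (PySem.Set.ofList (inds.filter (fun i => decide ((0:Int) ≤ i)))) (fun x => x) false
  let st :=
    dict.foldl
      (fun (st : PySem.Dict String (List Int) × PySem.Dict String (List Int)) kv =>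
        let pr := pvMergeLoop sel (PySem.List.enumerate kv.2) 0 [] []
        (st.1.insert kv.1 pr.1, st.2.insert kv.1 pr.2))
      ((PySem.Dict.empty : PySem.Dict String (List Int)), (PySem.Dict.empty : PySem.Dict String (List Int)))
  (st.1.items, st.2.items)

-- ===== PRECONDITION & SPEC =====
def Spec_filt_inds_from_dict (dict : List (String × List Int)) (inds : List Int) (out : (List (String × List Int)) × (List (String × List Int))) : Prop := out = filt_inds_from_dict_alt dict inds
instance (dict : List (String × List Int)) (inds : List Int) (out : (List (String × List Int)) × (List (String × List Int))) : Decidable (Spec_filt_inds_from_dict dict inds out) := by unfold Spec_filt_inds_from_dict; infer_instance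

-- ===== CLAIM (what is proved, stated in full; the proofs are below) =====
def Claim_equal_filt_inds_from_dict : Prop := ∀ (dict : List (String × List Int)) (inds : List Int), Dom_filt_inds_from_dict dict inds → Spec_filt_inds_from_dict dict inds (filt_inds_from_dict dict inds)

-- ===== LEMMAS AND PROOFS =====

-- the merge loop over enumerate v s, with pointer invariant: sel-positions before p
-- hold indices < s, positions from p on hold indices ≥ s
theorem pvMergeLoop_eq (sel : List Int) (hs : sel.Pairwise (· < ·))
    (v : List Int) (s : Int) (p : Int) (hp0 : 0 ≤ p) (hpl : p.toNat ≤ sel.length)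
    (hlt : ∀ k (h : k < sel.length), k < p.toNat → sel[k] < s)
    (hge : ∀ k (h : k < sel.length), p.toNat ≤ k → s ≤ sel[k])
    (vt vf : List Int) :
    pvMergeLoop sel (PySem.List.enumerate v s) p vt vf =
      (vt ++ ((PySem.List.enumerate v s).filter (fun q => sel.contains q.1)).map (·.2),
       vf ++ ((PySem.List.enumerate v s).filter (fun q => !(sel.contains q.1))).map (·.2)) := by
  induction v generalizing s p vt vf with
  | nil => simp [pvMergeLoop, PySem.List.enumerate_nil]
  | cons x v ih =>
    rw [PySem.List.enumerate_cons]
    by_cases hin : s ∈ sel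
    · -- s is a selected index: the pointer is exactly at it
      obtain ⟨k, hk, hsk⟩ := List.mem_iff_getElem.mp hin
      have hkp : p.toNat ≤ k := by
        by_contra h
        have := hlt k hk (by omega)
        omega
      have hplt : p.toNat < sel.length := by omega
      have hps : sel[p.toNat] = s := by
        have h1 := hge p.toNat hplt le_rfl
        rcases Nat.eq_or_lt_of_le hkp with h | h
        · subst h; exact hsk
        · have := (List.pairwise_iff_getElem.mp hs) p.toNat k hplt hk h
          omega
      have hget : PySem.List.pyGet? sel p = some sel[p.toNat] := by
        conv_lhs => rw [show p = ((p.toNat : Nat) : Int) from by omega]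
        rw [PySem.List.pyGet?_natCast, List.getElem?_eq_getElem hplt]
      have hcond : ((decide (p < (sel.length : Int))) && (((PySem.List.pyGet? sel p).getD 0) == s)) = true := by
        simp [hget, hps]; omega
      rw [pvMergeLoop, hcond]
      rw [ih (s + 1) (p + 1) (by omega) (by omega)
          (by intro k2 hk2 hk2p
              rcases Nat.lt_or_ge k2 p.toNat with h | h
              · have := hlt k2 hk2 h; omega
              · have : k2 = p.toNat := by omega
                subst this; omega)
          (by intro k2 hk2 hk2p
              have h1 : p.toNat < k2 := by omega
              have := (List.pairwise_iff_getElem.mp hs) p.toNat k2 hplt hk2 h1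
              omega)]
      simp [hin]
    · -- s is not selected: the condition is false
      have hcond : ((decide (p < (sel.length : Int))) && (((PySem.List.pyGet? sel p).getD 0) == s)) = false := by
        rcases Nat.lt_or_ge p.toNat sel.length with h | h
        · have hget : PySem.List.pyGet? sel p = some sel[p.toNat] := by
            conv_lhs => rw [show p = ((p.toNat : Nat) : Int) from by omega]
            rw [PySem.List.pyGet?_natCast, List.getElem?_eq_getElem h]
          have hne : sel[p.toNat] ≠ s := fun he => hin (he ▸ List.getElem_mem h)
          simp [hget, hne]
        · have : ¬ (p < (sel.length : Int)) := by omega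
          simp [this]
      rw [pvMergeLoop, hcond]
      simp only [Bool.false_eq_true, if_false]
      rw [ih (s + 1) p hp0 hpl
          (by intro k2 hk2 hk2p
              have := hlt k2 hk2 hk2p; omega)
          (by intro k2 hk2 hk2p
              have h1 := hge k2 hk2 hk2p
              have hne : sel[k2] ≠ s := fun he => hin (he ▸ List.getElem_mem hk2)
              omega)]
      simp [hin]

-- membership in Source B's sorted deduplicated nonnegative index list
theorem pvMem_sel (inds : List Int) (j : Int) :
    j ∈ PySem.List.sorted (PySem.Set.ofList (inds.filter (fun i => decide ((0:Int) ≤ i)))) (fun x => x) false ↔ (0 ≤ j ∧ j ∈ inds) := by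
  rw [PySem.List.mem_sorted, PySem.Set.mem_ofList, List.mem_filter]
  simp [and_comm]

-- per-value-list agreement: the merge against sel equals A's two filters
theorem pvSplit_eq (inds : List Int) (v : List Int) :
    pvMergeLoop (PySem.List.sorted (PySem.Set.ofList (inds.filter (fun i => decide ((0:Int) ≤ i)))) (fun x => x) false)
        (PySem.List.enumerate v) 0 [] [] =
      (((PySem.List.enumerate v).filter (fun p => inds.contains p.1)).map (·.2),
       ((PySem.List.enumerate v).filter (fun p => !(inds.contains p.1))).map (·.2)) := by
  set sel := PySem.List.sorted (PySem.Set.ofList (inds.filter (fun i => decide ((0:Int) ≤ i)))) (fun x => x) false with hsel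
  have hs : sel.Pairwise (· < ·) := PySem.List.sorted_ofList_pairwise_lt _
  have hmerge := pvMergeLoop_eq sel hs v 0 0 le_rfl (by simp)
      (by intro k hk hk0; omega)
      (by intro k hk _
          have : sel[k] ∈ sel := List.getElem_mem hk
          exact ((pvMem_sel inds _).mp (hsel ▸ this)).1)
      [] []
  rw [hmerge]
  have hcongr : ∀ q ∈ PySem.List.enumerate v (0 : Int), sel.contains q.1 = inds.contains q.1 := by
    intro q hq
    obtain ⟨k, hk, hqe⟩ := (PySem.List.mem_enumerate_iff _ _ _).mp hq
    have hq0 : 0 ≤ q.1 := by subst hqe; simp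
    simp only [List.contains_eq_mem, decide_eq_decide]
    rw [hsel, pvMem_sel]
    exact ⟨fun h => h.2, fun h => ⟨hq0, h⟩⟩
  have h1 : (PySem.List.enumerate v (0 : Int)).filter (fun q => sel.contains q.1)
      = (PySem.List.enumerate v (0 : Int)).filter (fun p => inds.contains p.1) :=
    List.filter_congr hcongr
  have h2 : (PySem.List.enumerate v (0 : Int)).filter (fun q => !(sel.contains q.1))
      = (PySem.List.enumerate v (0 : Int)).filter (fun p => !(inds.contains p.1)) :=
    List.filter_congr (fun q hq => by rw [hcongr q hq])
  rw [h1, h2]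
  simp

-- the outer folds agree pointwise (A additionally threads its unused counter)
theorem pvFold_eq (inds : List Int) (l : List (String × List Int)) (i : Int)
    (dt df : PySem.Dict String (List Int)) :
    (let st := l.foldl
        (fun (st : Int × PySem.Dict String (List Int) × PySem.Dict String (List Int)) kv =>
          let vtrue := ((PySem.List.enumerate kv.2).filter (fun p => inds.contains p.1)).map (·.2)
          let vfalse := ((PySem.List.enumerate kv.2).filter (fun p => !(inds.contains p.1))).map (·.2)
          (st.1 + 1, st.2.1.insert kv.1 vtrue, st.2.2.insert kv.1 vfalse))
        (i, dt, df)
     (st.2.1.items, st.2.2.items)) =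
    (let st' := l.foldl
      (fun (st : PySem.Dict String (List Int) × PySem.Dict String (List Int)) kv =>
        let pr := pvMergeLoop (PySem.List.sorted (PySem.Set.ofList (inds.filter (fun i => decide ((0:Int) ≤ i)))) (fun x => x) false)
            (PySem.List.enumerate kv.2) 0 [] []
        (st.1.insert kv.1 pr.1, st.2.insert kv.1 pr.2))
      (dt, df)
     (st'.1.items, st'.2.items)) := by
  induction l generalizing i dt df with
  | nil => simp
  | cons hd tl ih =>
    simp only [List.foldl_cons]
    rw [pvSplit_eq]
    exact ih (i + 1) _ _

-- ===== VERDICT (by name: the statement is the Claim_ definition above) =====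
theorem filt_inds_from_dict_spec : Claim_equal_filt_inds_from_dict := by
  intro dict inds _
  unfold Spec_filt_inds_from_dict filt_inds_from_dict filt_inds_from_dict_alt
  exact pvFold_eq inds dict 0 PySem.Dict.empty PySem.Dict.empty
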